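-- pv_equiv track=rewrite | github.com/kupl/Graphick | Heap_Abstracton/heap_merge_strategies.py | strategy_type_allocsite_keyheap
-- ===== SOURCE A (Python) =====
-- def strategy_type_allocsite_keyheap(obj_type_map, keyheaps):
--     print ('Default: type, keywords: allocsite, keyheaps: {}'.format(len(keyheaps)))
--
--     keytype_rep_map = {}
--     rst = {}
--
--     for obj in obj_type_map.keys():
--         if obj in keyheaps:
--             rst[obj] = obj
--         else:
--             if obj_type_map[obj] not in keytype_rep_map.keys():
--                 keytype_rep_map[obj_type_map[obj]] = obj
--             rst[obj] = keytype_rep_map[obj_type_map[obj]]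
--     return rst
-- ===== SOURCE B (Python) =====
-- def strategy_type_allocsite_keyheap(obj_type_map, keyheaps):
--     print ('Default: type, keywords: allocsite, keyheaps: {}'.format(len(keyheaps)))
--
--     # No representative index at all: a non-keyheap object maps to the FIRST
--     # non-keyheap object carrying the same type, found by a direct scan.
--     items = list(obj_type_map.items())
--     rst = {}
--     for obj, t in items:
--         if obj in keyheaps:
--             rst[obj] = obj
--         else:
--             rst[obj] = next(o for o, tt in items if tt == t and o not in keyheaps)
--     return rst
-- ===== Notes on version B (the rewrite author's own statement) =====
-- stated objective: alternative
-- what changed: A memoizes a type->representative dict built incrementally while producing the result; B keeps no index at all and computes each non-keyheap object's value by a direct first-match scan of the items for the first non-keyheap object of the same type.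
import Mathlib
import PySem

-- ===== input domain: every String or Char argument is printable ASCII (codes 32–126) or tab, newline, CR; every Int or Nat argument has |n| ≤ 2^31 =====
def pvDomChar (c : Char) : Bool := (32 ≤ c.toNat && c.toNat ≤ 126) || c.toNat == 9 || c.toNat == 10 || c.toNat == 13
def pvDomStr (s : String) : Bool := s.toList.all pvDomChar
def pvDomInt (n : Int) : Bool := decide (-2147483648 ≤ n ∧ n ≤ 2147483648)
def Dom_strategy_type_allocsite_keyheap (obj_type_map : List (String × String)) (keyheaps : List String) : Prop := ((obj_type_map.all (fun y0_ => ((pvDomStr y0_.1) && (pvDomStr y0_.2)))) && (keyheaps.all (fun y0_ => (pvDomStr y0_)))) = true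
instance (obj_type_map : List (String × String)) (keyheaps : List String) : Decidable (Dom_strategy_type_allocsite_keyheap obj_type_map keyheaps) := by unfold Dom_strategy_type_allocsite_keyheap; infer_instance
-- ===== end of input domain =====

-- B drops A's incrementally-built type→representative dict entirely: each non-keyheap object's
-- value is found by a direct first-match scan over the items (alternative algorithm, not faster;
-- the print side effect is kept identically in Source B).

-- ===== PORT A =====
def strategy_type_allocsite_keyheap (obj_type_map : List (String × String)) (keyheaps : List String) : List (String × String) :=
  let d := PySem.Dict.ofList obj_type_map
  let res := d.keys.foldl
    (fun (st : PySem.Dict String String × PySem.Dict String String) obj =>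
      if keyheaps.contains obj then
        (st.1, st.2.insert obj obj)
      else
        let t := d.getD obj ""
        let ktr := if st.1.contains t then st.1 else st.1.insert t obj
        (ktr, st.2.insert obj (ktr.getD t "")))
    (PySem.Dict.empty, PySem.Dict.empty)
  res.2.items

-- ===== PORT B =====
-- 'next(o for o, tt in items if tt == t and o not in keyheaps)' ported as find?; the .getD ""
-- branch is Python's StopIteration case, unreachable here because obj itself always matches.
def strategy_type_allocsite_keyheap_alt (obj_type_map : List (String × String)) (keyheaps : List String) : List (String × String) :=
  let items := (PySem.Dict.ofList obj_type_map).items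
  let rst := items.foldl
    (fun (rst : PySem.Dict String String) p =>
      if keyheaps.contains p.1 then rst.insert p.1 p.1
      else rst.insert p.1 (((items.find? (fun q => q.2 == p.2 && !keyheaps.contains q.1)).map Prod.fst).getD ""))
    PySem.Dict.empty
  rst.items

-- ===== PRECONDITION & SPEC =====
def Spec_strategy_type_allocsite_keyheap (obj_type_map : List (String × String)) (keyheaps : List String) (out : List (String × String)) : Prop := out = strategy_type_allocsite_keyheap_alt obj_type_map keyheaps
instance (obj_type_map : List (String × String)) (keyheaps : List String) (out : List (String × String)) : Decidable (Spec_strategy_type_allocsite_keyheap obj_type_map keyheaps out) := by unfold Spec_strategy_type_allocsite_keyheap; infer_instance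

-- ===== CLAIM (what is proved, stated in full; the proofs are below) =====
def Claim_equal_strategy_type_allocsite_keyheap : Prop := ∀ (obj_type_map : List (String × String)) (keyheaps : List String), Dom_strategy_type_allocsite_keyheap obj_type_map keyheaps → Spec_strategy_type_allocsite_keyheap obj_type_map keyheaps (strategy_type_allocsite_keyheap obj_type_map keyheaps)

-- ===== LEMMAS AND PROOFS =====

-- The incremental A-side rep-map step, over item pairs, with keyheaps fixed.
def pvRepStep (keyheaps : List String) (rep : PySem.Dict String String) (p : String × String) : PySem.Dict String String :=
  if !keyheaps.contains p.1 && !rep.contains p.2 then rep.insert p.2 p.1 else rep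

-- A's loop step, over item pairs (the type lookup already resolved to p.2).
def pvStepA (keyheaps : List String) (st : PySem.Dict String String × PySem.Dict String String) (p : String × String) : PySem.Dict String String × PySem.Dict String String :=
  if keyheaps.contains p.1 then
    (st.1, st.2.insert p.1 p.1)
  else
    let ktr := if st.1.contains p.2 then st.1 else st.1.insert p.2 p.1
    (ktr, st.2.insert p.1 (ktr.getD p.2 ""))

-- B's first-match value for an item pair.
def pvValB (items : List (String × String)) (keyheaps : List String) (p : String × String) : String :=
  if keyheaps.contains p.1 then p.1
  else ((items.find? (fun q => q.2 == p.2 && !keyheaps.contains q.1)).map Prod.fst).getD ""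

-- The rep map only grows: an existing binding survives the rest of the loop.
theorem pvRep_mono (keyheaps : List String) (l : List (String × String)) (rep : PySem.Dict String String) (t : String) (h : rep.contains t = true) :
    (l.foldl (pvRepStep keyheaps) rep).getD t "" = rep.getD t "" := by
  induction l generalizing rep with
  | nil => rfl
  | cons p l ih =>
    simp only [List.foldl_cons, pvRepStep]
    split_ifs with hc
    · have hne : p.2 ≠ t := by
        intro he; subst he; simp [h] at hc
      have h' : (rep.insert p.2 p.1).contains t = true := by
        simp [PySem.Dict.contains_insert, h]
      rw [ih _ h', PySem.Dict.getD_insert_of_ne]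
      exact hne.symm
    · exact ih _ h

-- The final rep-map binding for a fresh type t is exactly the first non-keyheap object of type t.
theorem pvRep_char (keyheaps : List String) (l : List (String × String)) (rep : PySem.Dict String String) (t : String) (h : rep.contains t = false) :
    (l.foldl (pvRepStep keyheaps) rep).getD t "" =
      ((l.find? (fun q => q.2 == t && !keyheaps.contains q.1)).map Prod.fst).getD "" := by
  induction l generalizing rep with
  | nil =>
    rw [List.foldl_nil, List.find?_nil]
    simpa using PySem.Dict.getD_of_not_contains rep "" h
  | cons p l ih =>
    rw [List.foldl_cons]
    by_cases hpred : (p.2 == t && !keyheaps.contains p.1) = true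
    · have hb := (Bool.and_eq_true ..).mp hpred
      have ht : p.2 = t := beq_iff_eq.mp hb.1
      have hk : keyheaps.contains p.1 = false := by simpa using hb.2
      have hstep : pvRepStep keyheaps rep p = rep.insert p.2 p.1 := by
        unfold pvRepStep
        rw [if_pos (by rw [hk, ht, h]; rfl)]
      have hf : List.find? (fun q : String × String => q.2 == t && !keyheaps.contains q.1) (p :: l) = some p :=
        List.find?_cons_of_pos (show (fun q : String × String => q.2 == t && !keyheaps.contains q.1) p = true from hpred)
      rw [hstep, hf]
      have hc : (rep.insert p.2 p.1).contains p.2 = true := PySem.Dict.contains_insert_self ..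
      rw [← ht] at h ⊢
      rw [pvRep_mono keyheaps l _ p.2 hc, PySem.Dict.getD_insert_self]
      rfl
    · have hpred' : (p.2 == t && !keyheaps.contains p.1) = false := by
        simpa using hpred
      rw [List.find?_cons_of_neg (by simpa using hpred')]
      by_cases hc : pvRepStep keyheaps rep p = rep
      · rw [hc, ih _ h]
      · -- the step inserted: keyheaps.contains p.1 = false and p.2 ≠ t
        have hcond : (!keyheaps.contains p.1 && !rep.contains p.2) = true := by
          by_contra hcc
          exact hc (by unfold pvRepStep; rw [if_neg (by simpa using hcc)])
        have hb := (Bool.and_eq_true ..).mp hcond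
        have hk : keyheaps.contains p.1 = false := by simpa using hb.1
        have ht : p.2 ≠ t := by
          intro he
          rw [he, hk] at hpred'
          simp at hpred'
        have hstep : pvRepStep keyheaps rep p = rep.insert p.2 p.1 := by
          unfold pvRepStep; rw [if_pos hcond]
        have h' : (rep.insert p.2 p.1).contains t = false := by
          rw [PySem.Dict.contains_insert]
          simp [h, Ne.symm ht]
        rw [hstep, ih _ h']

-- A's interleaved loop writes, for each object, exactly the value read from the FINAL rep map.
theorem pvMain (keyheaps : List String) (l : List (String × String)) (rep rst : PySem.Dict String String)
    (hnd : (l.map Prod.fst).Nodup)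
    (hfresh : ∀ p ∈ l, rst.contains p.1 = false) :
    (l.foldl (pvStepA keyheaps) (rep, rst)).2.items =
      rst.items ++ l.map (fun p => (p.1, if keyheaps.contains p.1 then p.1 else (l.foldl (pvRepStep keyheaps) rep).getD p.2 "")) := by
  induction l generalizing rep rst with
  | nil => simp
  | cons p l ih =>
    have hp : rst.contains p.1 = false := hfresh p (List.mem_cons_self ..)
    have hnd' : (l.map Prod.fst).Nodup := (List.nodup_cons.mp hnd).2
    have hpnotin : p.1 ∉ l.map Prod.fst := (List.nodup_cons.mp hnd).1
    simp only [List.foldl_cons, List.map_cons]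
    by_cases hk : keyheaps.contains p.1 = true
    · have hk2 : p.1 ∈ keyheaps := by simpa using hk
      have hstep : pvStepA keyheaps (rep, rst) p = (rep, rst.insert p.1 p.1) := by
        simp [pvStepA, hk2]
      have hrep : pvRepStep keyheaps rep p = rep := by
        simp [pvRepStep, hk2]
      rw [hstep, hrep, ih rep _ hnd' ?_, PySem.Dict.items_insert_of_not_contains rst _ hp]
      · simp [hk2]
      · intro q hq
        rw [PySem.Dict.contains_insert]
        have : q.1 ≠ p.1 := by
          intro he; exact hpnotin (he ▸ List.mem_map_of_mem hq)
        simp [this, hfresh q (List.mem_cons_of_mem _ hq)]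
    · have hk' : p.1 ∉ keyheaps := by simpa using hk
      have hfresh' : ∀ q ∈ l, (rst.insert p.1 (((if rep.contains p.2 then rep else rep.insert p.2 p.1)).getD p.2 "")).contains q.1 = false := by
        intro q hq
        rw [PySem.Dict.contains_insert]
        have : q.1 ≠ p.1 := by
          intro he; exact hpnotin (he ▸ List.mem_map_of_mem hq)
        simp [this, hfresh q (List.mem_cons_of_mem _ hq)]
      by_cases hc : rep.contains p.2 = true
      · have hstep : pvStepA keyheaps (rep, rst) p = (rep, rst.insert p.1 (rep.getD p.2 "")) := by
          simp [pvStepA, hk', hc]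
        have hrep : pvRepStep keyheaps rep p = rep := by
          simp [pvRepStep, hc]
        rw [hstep, hrep, ih rep _ hnd' ?_, PySem.Dict.items_insert_of_not_contains rst _ hp]
        · rw [pvRep_mono keyheaps l rep p.2 hc]
          simp [hk']
        · intro q hq
          have := hfresh' q hq
          simpa [hc] using this
      · have hc' : rep.contains p.2 = false := by simpa using hc
        have hstep : pvStepA keyheaps (rep, rst) p = (rep.insert p.2 p.1, rst.insert p.1 ((rep.insert p.2 p.1).getD p.2 "")) := by
          simp [pvStepA, hk', hc']
        have hrep : pvRepStep keyheaps rep p = rep.insert p.2 p.1 := by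
          simp [pvRepStep, hk', hc']
        rw [hstep, hrep, ih _ _ hnd' ?_, PySem.Dict.items_insert_of_not_contains rst _ hp]
        · have hmem : (rep.insert p.2 p.1).contains p.2 = true := PySem.Dict.contains_insert_self ..
          rw [pvRep_mono keyheaps l _ p.2 hmem, PySem.Dict.getD_insert_self]
          simp [hk']
        · intro q hq
          have := hfresh' q hq
          simpa [hc'] using this

-- B's fold is a fresh-key insert fold of pvValB: its items are the items mapped through pvValB.
theorem pvAltEq (obj_type_map : List (String × String)) (keyheaps : List String) :
    strategy_type_allocsite_keyheap_alt obj_type_map keyheaps =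
      (PySem.Dict.ofList obj_type_map).items.map
        (fun p => (p.1, pvValB (PySem.Dict.ofList obj_type_map).items keyheaps p)) := by
  unfold strategy_type_allocsite_keyheap_alt
  simp only []
  set items := (PySem.Dict.ofList obj_type_map).items with hi
  have hndi : (items.map Prod.fst).Nodup := PySem.Dict.nodup_keys_ofList obj_type_map
  rw [PySem.List.foldl_congr_mem items _
    (fun (rst : PySem.Dict String String) p => rst.insert p.1 (pvValB items keyheaps p))
    PySem.Dict.empty
    (by
      intro rst p _
      simp only [pvValB]
      split_ifs <;> rfl)]
  rw [PySem.Dict.items_foldl_insert_fresh items Prod.fst (pvValB items keyheaps) PySem.Dict.empty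
    (by intro q _; exact PySem.Dict.contains_empty _) hndi]
  rfl

-- ===== VERDICT (by name: the statement is the Claim_ definition above) =====
theorem strategy_type_allocsite_keyheap_spec : Claim_equal_strategy_type_allocsite_keyheap := by
  intro obj_type_map keyheaps _
  unfold Spec_strategy_type_allocsite_keyheap
  rw [pvAltEq]
  unfold strategy_type_allocsite_keyheap
  simp only []
  set d := PySem.Dict.ofList obj_type_map with hd
  have hnodup : d.keys.Nodup := PySem.Dict.nodup_keys_ofList obj_type_map
  have hkeys : d.keys = d.items.map Prod.fst := rfl
  have hndi : (d.items.map Prod.fst).Nodup := by rw [← hkeys]; exact hnodup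
  -- A as a fold over items, lookup resolved to the stored type
  rw [hkeys, List.foldl_map]
  rw [PySem.List.foldl_congr_mem _ _ (pvStepA keyheaps) _
    (by
      intro st p hp
      obtain ⟨o, t⟩ := p
      have hlook : d.getD o "" = t := PySem.Dict.getD_of_mem_items d hp hnodup ""
      simp [pvStepA, hlook])]
  rw [pvMain keyheaps d.items PySem.Dict.empty PySem.Dict.empty hndi
    (by intro q hq; exact PySem.Dict.contains_empty _)]
  -- pointwise: final rep map lookup = first-match scan
  have hnil : (PySem.Dict.empty : PySem.Dict String String).items = [] := rfl
  rw [hnil, List.nil_append]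
  refine List.map_congr_left ?_
  intro p hp
  unfold pvValB
  by_cases hk : keyheaps.contains p.1 = true
  · rw [if_pos hk, if_pos hk]
  · rw [if_neg hk, if_neg hk]
    exact congrArg _ (pvRep_char keyheaps d.items PySem.Dict.empty p.2 (PySem.Dict.contains_empty _))
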